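-- pv_equiv track=rewrite | github.com/glassk/algorithm | Python/Inflearn/2_탐색과 시뮬레이션/review.py | solution
-- ===== SOURCE A (Python) =====
-- def solution(n, board):
--     answer = 0
--     for i in range(n):
--         sum1, sum2 = 0, 0
--         for j in range(n):
--             sum1 += board[i][j]
--             sum2 += board[j][i]
--         answer = max(sum1, sum2, answer)
--
--     sum1, sum2 = 0, 0
--     for i in range(n):
--         sum1 += board[i][i]
--         sum2 += board[i][n-i-1]
--     answer = max(sum1, sum2, answer)
--
--     return answer
-- ===== SOURCE B (Python) =====
-- def solution(n, board):
--     # Bucket approach: one pass over the cells, scattering each value into a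
--     # flat table of 2n+2 line accumulators (rows 0..n-1, columns n..2n-1,
--     # main diagonal 2n, anti-diagonal 2n+1), then one max over the table.
--     acc = [0] * (2 * n + 2)
--     for i in range(n):
--         for j in range(n):
--             v = board[i][j]
--             acc[i] += v
--             acc[n + j] += v
--             if i == j:
--                 acc[2 * n] += v
--             if i + j == n - 1:
--                 acc[2 * n + 1] += v
--     return max([0] + acc)
-- ===== Notes on version B (the rewrite author's own statement) =====
-- stated objective: alternative
-- what changed: A gathers each line's sum with per-line loops (a fused row+column double loop with a running max, then a diagonal loop); B makes ONE pass over the cells and scatters each value into a flat table of 2n+2 line accumulators (rows, columns, both diagonals), then takes a single max over the table together with 0.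
import Mathlib
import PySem

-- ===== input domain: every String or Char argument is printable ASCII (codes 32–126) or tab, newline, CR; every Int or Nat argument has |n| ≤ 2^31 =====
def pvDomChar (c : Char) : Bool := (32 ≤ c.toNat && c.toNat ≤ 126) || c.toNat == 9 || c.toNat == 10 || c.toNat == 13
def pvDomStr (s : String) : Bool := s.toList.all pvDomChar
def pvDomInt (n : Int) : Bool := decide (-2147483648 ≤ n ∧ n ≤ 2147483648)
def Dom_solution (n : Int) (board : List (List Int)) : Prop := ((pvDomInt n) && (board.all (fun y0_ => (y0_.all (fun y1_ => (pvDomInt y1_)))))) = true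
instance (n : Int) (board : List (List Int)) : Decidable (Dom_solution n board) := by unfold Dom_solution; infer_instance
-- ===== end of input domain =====

-- B replaces A's per-line gather loops (row+column sums fused in one double loop with a running
-- max, then a diagonal loop) with a single per-cell scatter pass into a flat table of 2n+2 line
-- accumulators, followed by one max over the table; same cost, different algorithm shape.

-- ===== PORT A =====
-- board[i][j]; the defaults are unreachable under Pre_solution (every index used is in range), exact there
def pvGet2 (board : List (List Int)) (i j : Int) : Int :=
  PySem.List.pyGetD (PySem.List.pyGetD board i []) j 0

def solution (n : Int) (board : List (List Int)) : Int :=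
  let answer := (PySem.List.pyRange 0 n 1).foldl (fun answer i =>
    let s := (PySem.List.pyRange 0 n 1).foldl
      (fun (s : Int × Int) j => (s.1 + pvGet2 board i j, s.2 + pvGet2 board j i)) (0, 0)
    max s.1 (max s.2 answer)) 0
  let s := (PySem.List.pyRange 0 n 1).foldl
    (fun (s : Int × Int) i => (s.1 + pvGet2 board i i, s.2 + pvGet2 board i (n - i - 1))) (0, 0)
  max s.1 (max s.2 answer)

-- ===== PORT B =====
-- acc[k] += v; exact under Pre_solution (the index is always 0 ≤ k < len(acc) at every use)
def pvBump (acc : List Int) (k : Int) (v : Int) : List Int :=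
  PySem.List.pySetD acc k (PySem.List.pyGetD acc k 0 + v)

def solution_alt (n : Int) (board : List (List Int)) : Int :=
  let acc0 : List Int := List.replicate (2 * n + 2).toNat 0
  let acc := (PySem.List.pyRange 0 n 1).foldl (fun acc i =>
    (PySem.List.pyRange 0 n 1).foldl (fun acc j =>
      let v := pvGet2 board i j
      let acc := pvBump acc i v
      let acc := pvBump acc (n + j) v
      let acc := if i = j then pvBump acc (2 * n) v else acc
      if i + j = n - 1 then pvBump acc (2 * n + 1) v else acc) acc) acc0
  -- max([0] + acc): Python max of a nonempty list
  (PySem.List.max? ((0 : Int) :: acc) (fun y => y)).getD 0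

-- ===== PRECONDITION & SPEC =====
-- Pre_ excludes exactly the inputs on which A raises IndexError: boards with fewer than n rows,
-- or whose first n rows have fewer than n entries.
def Pre_solution (n : Int) (board : List (List Int)) : Prop :=
  n ≤ (board.length : Int) ∧ ∀ row ∈ board.take n.toNat, n ≤ (row.length : Int)
instance (n : Int) (board : List (List Int)) : Decidable (Pre_solution n board) := by
  unfold Pre_solution; infer_instance

def pvWitness_solution : Int × List (List Int) := (2, [[1, 2], [3, 4]])

def Spec_solution (n : Int) (board : List (List Int)) (out : Int) : Prop := out = solution_alt n board
instance (n : Int) (board : List (List Int)) (out : Int) : Decidable (Spec_solution n board out) := by unfold Spec_solution; infer_instance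

-- ===== CLAIM (what is proved, stated in full; the proofs are below) =====
def Claim_equal_solution : Prop := ∀ (n : Int) (board : List (List Int)), Dom_solution n board → Pre_solution n board → Spec_solution n board (solution n board)

-- ===== LEMMAS AND PROOFS =====

-- foldl max distributes over a max in the seed
lemma pv_foldl_max_max (l : List Int) : ∀ a b : Int, l.foldl max (max a b) = max a (l.foldl max b) := by
  induction l with
  | nil => intro a b; rfl
  | cons x t ih =>
    intro a b
    simp only [List.foldl_cons, max_assoc]
    exact ih a (max b x)

-- A's running max over two projections is the max of the two projected maxima
lemma pv_foldl_pair_max (f g : Int → Int) (l : List Int) : ∀ c : Int,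
    l.foldl (fun a i => max (f i) (max (g i) a)) c
      = max ((l.map f).foldl max c) ((l.map g).foldl max c) := by
  induction l with
  | nil => intro c; simp
  | cons i t ih =>
    intro c
    simp only [List.foldl_cons, List.map_cons, ih]
    rw [max_comm c (f i), max_comm c (g i)]
    have e1 : (t.map f).foldl max (max (f i) (max (g i) c)) = max (f i) (max (g i) ((t.map f).foldl max c)) := by
      rw [pv_foldl_max_max, pv_foldl_max_max]
    have e2 : (t.map g).foldl max (max (f i) (max (g i) c)) = max (f i) (max (g i) ((t.map g).foldl max c)) := by
      rw [pv_foldl_max_max, pv_foldl_max_max]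
    rw [e1, e2, pv_foldl_max_max (t.map f) (f i) c, pv_foldl_max_max (t.map g) (g i) c]
    generalize (t.map f).foldl max c = A
    generalize (t.map g).foldl max c = B
    omega

-- reading out a prefix elementwise
lemma pv_map_getD_range (xs : List Int) (N : Nat) (h : N ≤ xs.length) :
    (List.range N).map (fun k => xs.getD k 0) = xs.take N := by
  apply List.ext_getElem
  · simp [Nat.min_eq_left h]
  · intro k h1 h2
    simp only [List.getElem_map, List.getElem_range, List.getElem_take]
    rw [List.getD_eq_getElem _ _ (by simp at h1; omega)]

-- A's running-max value and B's line sums, both expressed through these common sums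
def pvR (board : List (List Int)) (n i : Int) : Int := ((PySem.List.pyRange 0 n 1).map (fun j => pvGet2 board i j)).sum
def pvC (board : List (List Int)) (n i : Int) : Int := ((PySem.List.pyRange 0 n 1).map (fun j => pvGet2 board j i)).sum

lemma pvA_eq (n : Int) (board : List (List Int)) :
    solution n board =
      max (((PySem.List.pyRange 0 n 1).map (fun i => pvGet2 board i i)).sum)
        (max (((PySem.List.pyRange 0 n 1).map (fun i => pvGet2 board i (n - i - 1))).sum)
          (max (((PySem.List.pyRange 0 n 1).map (pvR board n)).foldl max 0)
               (((PySem.List.pyRange 0 n 1).map (pvC board n)).foldl max 0))) := by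
  unfold solution
  rw [PySem.List.foldl_prod_mk (f := fun s i => s + pvGet2 board i i)
      (g := fun s i => s + pvGet2 board i (n - i - 1))]
  rw [PySem.List.foldl_congr_mem _ _ (fun a i => max (pvR board n i) (max (pvC board n i) a)) 0
      (by intro a i _
          rw [PySem.List.foldl_prod_mk (f := fun s j => s + pvGet2 board i j)
              (g := fun s j => s + pvGet2 board j i)]
          simp [PySem.List.foldl_add, pvR, pvC])]
  rw [pv_foldl_pair_max]
  simp [PySem.List.foldl_add]

-- ---- B-side machinery (proof-only): pointwise characterization of the scatter pass ----

-- cell value at Nat coordinates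
def pvV (board : List (List Int)) (i j : Nat) : Int := pvGet2 board (i : Int) (j : Int)

-- contribution of cell (i, j) to bucket m in a board of size N
def pvCell (board : List (List Int)) (N i j m : Nat) : Int :=
  (if m = i then pvV board i j else 0) + (if m = N + j then pvV board i j else 0)
  + (if i = j ∧ m = 2 * N then pvV board i j else 0)
  + (if i + j + 1 = N ∧ m = 2 * N + 1 then pvV board i j else 0)

-- the per-cell body of B's scatter loop, named for the proofs (defeq to the port's inner lambda)
def pvBodyJ (board : List (List Int)) (n : Int) (acc : List Int) (i j : Int) : List Int :=
  let v := pvGet2 board i j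
  let acc1 := pvBump acc i v
  let acc2 := pvBump acc1 (n + j) v
  let acc3 := if i = j then pvBump acc2 (2 * n) v else acc2
  if i + j = n - 1 then pvBump acc3 (2 * n + 1) v else acc3

-- B's whole scatter pass at Nat level
def pvScatter (board : List (List Int)) (N : Nat) : List Int :=
  (List.range N).foldl
    (fun (acc : List Int) (i : Nat) => (List.range N).foldl
      (fun (acc : List Int) (j : Nat) => pvBodyJ board (N : Int) acc (i : Int) (j : Int)) acc)
    (List.replicate (2 * N + 2) 0)

lemma pv_getD_set (acc : List Int) (k m : Nat) (v : Int) (hk : k < acc.length) :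
    (acc.set k v).getD m 0 = if m = k then v else acc.getD m 0 := by
  by_cases hm : m = k
  · subst hm
    rw [if_pos rfl, List.getD_eq_getElem _ _ (by simpa using hk), List.getElem_set_self]
  · rw [if_neg hm]
    by_cases hml : m < acc.length
    · rw [List.getD_eq_getElem _ _ (by simpa using hml), List.getD_eq_getElem _ _ hml,
        List.getElem_set_ne (by omega)]
    · rw [List.getD_eq_default _ _ (by simpa using Nat.le_of_not_lt hml),
        List.getD_eq_default _ _ (Nat.le_of_not_lt hml)]

lemma pv_bump_length (acc : List Int) (k : Nat) (v : Int) :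
    (pvBump acc (k : Int) v).length = acc.length := by
  unfold pvBump
  rw [PySem.List.pySetD_natCast]
  simp

lemma pv_bump_getD (acc : List Int) (k m : Nat) (v : Int) (hk : k < acc.length) :
    (pvBump acc (k : Int) v).getD m 0 = acc.getD m 0 + (if m = k then v else 0) := by
  unfold pvBump
  rw [PySem.List.pySetD_natCast, PySem.List.pyGetD_natCast, pv_getD_set acc k m _ hk]
  by_cases hm : m = k
  · subst hm; simp
  · simp [hm]

lemma pv_bump_if_length (c : Prop) [Decidable c] (X : List Int) (k : Nat) (v : Int) :
    (if c then pvBump X (k : Int) v else X).length = X.length := by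
  split
  · rw [pv_bump_length]
  · rfl

lemma pv_bump_if_getD (c : Prop) [Decidable c] (X : List Int) (k m : Nat) (v : Int)
    (hk : k < X.length) :
    (if c then pvBump X (k : Int) v else X).getD m 0
      = X.getD m 0 + (if c ∧ m = k then v else 0) := by
  by_cases hc : c
  · rw [if_pos hc, pv_bump_getD _ _ _ _ hk]
    by_cases hm : m = k <;> simp [hc, hm]
  · rw [if_neg hc]
    simp [hc]

-- a fold whose body adds c x m to bucket m ends with the summed contributions
lemma pv_fold_getD {A : Type} (f : List Int → A → List Int) (c : A → Nat → Int) (L : Nat) :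
    ∀ (l : List A),
      (∀ acc x, x ∈ l → acc.length = L → (f acc x).length = L ∧
        ∀ m, (f acc x).getD m 0 = acc.getD m 0 + c x m) →
      ∀ acc, acc.length = L →
        (l.foldl f acc).length = L ∧
        ∀ m, (l.foldl f acc).getD m 0 = acc.getD m 0 + (l.map (fun x => c x m)).sum := by
  intro l
  induction l with
  | nil => intro _ acc h; exact ⟨h, by simp⟩
  | cons x t ih =>
    intro hf acc h
    obtain ⟨h1, h2⟩ := hf acc x List.mem_cons_self h
    obtain ⟨h3, h4⟩ := ih (fun acc2 y hy hacc2 => hf acc2 y (List.mem_cons_of_mem _ hy) hacc2) (f acc x) h1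
    refine ⟨by simpa using h3, ?_⟩
    intro m
    simp only [List.foldl_cons, List.map_cons, List.sum_cons]
    rw [h4 m, h2 m, add_assoc]

-- the per-cell body adds exactly pvCell
lemma pv_cell_step (board : List (List Int)) (N i j : Nat) (hi : i < N) (hj : j < N)
    (acc : List Int) (hL : acc.length = 2 * N + 2) :
    (pvBodyJ board (N : Int) acc (i : Int) (j : Int)).length = 2 * N + 2 ∧
    ∀ m, (pvBodyJ board (N : Int) acc (i : Int) (j : Int)).getD m 0
      = acc.getD m 0 + pvCell board N i j m := by
  have c1 : ((N : Int) + (j : Int)) = ((N + j : Nat) : Int) := by push_cast; ring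
  have c2 : (2 * (N : Int)) = ((2 * N : Nat) : Int) := by push_cast; ring
  have c3 : (2 * (N : Int) + 1) = ((2 * N + 1 : Nat) : Int) := by push_cast; ring
  have c4 : (((2 * N : Nat) : Int) + 1) = ((2 * N + 1 : Nat) : Int) := by push_cast; ring
  unfold pvBodyJ
  simp only [c1, c2, c4, Nat.cast_inj,
    show ((i : Int) + (j : Int) = (N : Int) - 1) ↔ (i + j + 1 = N) from by omega]
  set v := pvGet2 board (i : Int) (j : Int) with hv
  have L1 : (pvBump acc (i : Int) v).length = 2 * N + 2 := by rw [pv_bump_length, hL]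
  have L2 : (pvBump (pvBump acc (i : Int) v) ((N + j : Nat) : Int) v).length = 2 * N + 2 := by
    rw [pv_bump_length, L1]
  have L3 : (if i = j then pvBump (pvBump (pvBump acc (i : Int) v) ((N + j : Nat) : Int) v) ((2 * N : Nat) : Int) v
        else pvBump (pvBump acc (i : Int) v) ((N + j : Nat) : Int) v).length = 2 * N + 2 := by
    rw [pv_bump_if_length, L2]
  refine ⟨?_, ?_⟩
  · rw [pv_bump_if_length, L3]
  · intro m
    rw [pv_bump_if_getD _ _ _ _ _ (by rw [L3]; omega),
        pv_bump_if_getD _ _ _ _ _ (by rw [L2]; omega),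
        pv_bump_getD _ _ _ _ (by rw [L1]; omega),
        pv_bump_getD _ _ _ _ (by rw [hL]; omega)]
    unfold pvCell pvV
    rw [← hv]
    ring

-- summing an indicator over range N
lemma pv_sum_single (N t : Nat) (g : Nat → Int) (h : t < N) :
    ((List.range N).map (fun j => if j = t then g j else 0)).sum = g t := by
  induction N with
  | zero => omega
  | succ N ih =>
    rw [List.range_succ, List.map_append, List.sum_append]
    by_cases ht : t = N
    · subst ht
      rw [show ((List.range t).map (fun j => if j = t then g j else 0)).sum = 0 from by
        rw [List.map_congr_left (fun j hj => by
          rw [List.mem_range] at hj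
          simp [Nat.ne_of_lt hj] : ∀ j ∈ List.range t, (if j = t then g j else 0) = 0)]
        simp]
      simp
    · rw [ih (by omega)]
      simp
      intro h
      exact absurd h.symm ht

lemma pv_sum_zero {N : Nat} (g : Nat → Int) (P : Nat → Prop) [DecidablePred P]
    (h : ∀ j < N, ¬ P j) :
    ((List.range N).map (fun j => if P j then g j else 0)).sum = 0 := by
  rw [List.map_congr_left (fun j hj => by
    rw [List.mem_range] at hj
    simp [h j hj] : ∀ j ∈ List.range N, (if P j then g j else 0) = 0)]
  simp

-- foldl max 0 over all-zero list
lemma pv_foldl_max_replicate (k : Nat) : (List.replicate k (0 : Int)).foldl max 0 = 0 := by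
  induction k with
  | zero => rfl
  | succ k ih => rw [List.replicate_succ, List.foldl_cons, max_self]; exact ih

lemma pv_repl_getD (K m : Nat) : (List.replicate K (0 : Int)).getD m 0 = 0 := by
  by_cases hm : m < K
  · rw [List.getD_replicate _ hm]
  · rw [List.getD_eq_default _ _ (by simpa using Nat.le_of_not_lt hm)]

-- bucket sums: the double contribution sum evaluated at each bucket index
lemma pv_S_row (board : List (List Int)) (N m : Nat) (_hN : 0 < N) (hm : m < N) :
    ((List.range N).map (fun i => ((List.range N).map (fun j => pvCell board N i j m)).sum)).sum
      = ((List.range N).map (fun j => pvV board m j)).sum := by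
  rw [List.map_congr_left (fun i hi => by
    rw [List.mem_range] at hi
    unfold pvCell
    rw [PySem.List.sum_map_add_int, PySem.List.sum_map_add_int, PySem.List.sum_map_add_int,
        pv_sum_zero (fun j => pvV board i j) (fun j => m = N + j) (by intro j hj hP; omega),
        pv_sum_zero (fun j => pvV board i j) (fun j => i = j ∧ m = 2 * N)
          (by intro j hj hP; omega),
        pv_sum_zero (fun j => pvV board i j) (fun j => i + j + 1 = N ∧ m = 2 * N + 1)
          (by intro j hj hP; omega)]
    rw [show ((List.range N).map (fun j => if m = i then pvV board i j else 0)).sum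
        = if i = m then ((List.range N).map (fun j => pvV board i j)).sum else 0 from by
      by_cases hmi : m = i
      · rw [if_pos (hmi.symm)]
        simp [hmi]
      · rw [if_neg (fun h => hmi h.symm)]
        simp [hmi]]
    simp :
    ∀ i ∈ List.range N, ((List.range N).map (fun j => pvCell board N i j m)).sum
      = if i = m then ((List.range N).map (fun j => pvV board i j)).sum else 0)]
  exact pv_sum_single N m (fun i => ((List.range N).map (fun j => pvV board i j)).sum) hm

lemma pv_S_col (board : List (List Int)) (N k : Nat) (_hN : 0 < N) (hk : k < N) :
    ((List.range N).map (fun i => ((List.range N).map (fun j => pvCell board N i j (N + k))).sum)).sum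
      = ((List.range N).map (fun i => pvV board i k)).sum := by
  rw [List.map_congr_left (fun i hi => by
    rw [List.mem_range] at hi
    unfold pvCell
    rw [PySem.List.sum_map_add_int, PySem.List.sum_map_add_int, PySem.List.sum_map_add_int,
        pv_sum_zero (fun j => pvV board i j) (fun j => N + k = i) (by intro j hj hP; omega),
        pv_sum_zero (fun j => pvV board i j) (fun j => i = j ∧ N + k = 2 * N)
          (by intro j hj hP; omega),
        pv_sum_zero (fun j => pvV board i j) (fun j => i + j + 1 = N ∧ N + k = 2 * N + 1)
          (by intro j hj hP; omega)]
    rw [List.map_congr_left (fun j hj => if_congr (by omega) rfl rfl :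
      ∀ j ∈ List.range N, (if N + k = N + j then pvV board i j else 0)
        = if j = k then pvV board i j else 0)]
    rw [pv_sum_single N k (fun j => pvV board i j) hk]
    simp :
    ∀ i ∈ List.range N, ((List.range N).map (fun j => pvCell board N i j (N + k))).sum
      = pvV board i k)]

lemma pv_S_diag (board : List (List Int)) (N : Nat) (_hN : 0 < N) :
    ((List.range N).map (fun i => ((List.range N).map (fun j => pvCell board N i j (2 * N))).sum)).sum
      = ((List.range N).map (fun i => pvV board i i)).sum := by
  rw [List.map_congr_left (fun i hi => by
    rw [List.mem_range] at hi
    unfold pvCell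
    rw [PySem.List.sum_map_add_int, PySem.List.sum_map_add_int, PySem.List.sum_map_add_int,
        pv_sum_zero (fun j => pvV board i j) (fun j => (2 * N : Nat) = i) (by intro j hj hP; omega),
        pv_sum_zero (fun j => pvV board i j) (fun j => (2 * N : Nat) = N + j) (by intro j hj hP; omega),
        pv_sum_zero (fun j => pvV board i j) (fun j => i + j + 1 = N ∧ (2 * N : Nat) = 2 * N + 1)
          (by intro j hj hP; omega)]
    rw [List.map_congr_left (fun j hj => if_congr (by omega) rfl rfl :
      ∀ j ∈ List.range N, (if i = j ∧ (2 * N : Nat) = 2 * N then pvV board i j else 0)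
        = if j = i then pvV board i j else 0)]
    rw [pv_sum_single N i (fun j => pvV board i j) hi]
    simp :
    ∀ i ∈ List.range N, ((List.range N).map (fun j => pvCell board N i j (2 * N))).sum
      = pvV board i i)]

lemma pv_S_anti (board : List (List Int)) (N : Nat) (_hN : 0 < N) :
    ((List.range N).map (fun i => ((List.range N).map (fun j => pvCell board N i j (2 * N + 1))).sum)).sum
      = ((List.range N).map (fun i => pvV board i (N - 1 - i))).sum := by
  rw [List.map_congr_left (fun i hi => by
    rw [List.mem_range] at hi
    unfold pvCell
    rw [PySem.List.sum_map_add_int, PySem.List.sum_map_add_int, PySem.List.sum_map_add_int,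
        pv_sum_zero (fun j => pvV board i j) (fun j => (2 * N + 1 : Nat) = i) (by intro j hj hP; omega),
        pv_sum_zero (fun j => pvV board i j) (fun j => (2 * N + 1 : Nat) = N + j) (by intro j hj hP; omega),
        pv_sum_zero (fun j => pvV board i j) (fun j => i = j ∧ (2 * N + 1 : Nat) = 2 * N)
          (by intro j hj hP; omega)]
    rw [List.map_congr_left (fun j hj => if_congr (by omega) rfl rfl :
      ∀ j ∈ List.range N, (if i + j + 1 = N ∧ (2 * N + 1 : Nat) = 2 * N + 1 then pvV board i j else 0)
        = if j = N - 1 - i then pvV board i j else 0)]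
    rw [pv_sum_single N (N - 1 - i) (fun j => pvV board i j) (by omega)]
    simp :
    ∀ i ∈ List.range N, ((List.range N).map (fun j => pvCell board N i j (2 * N + 1))).sum
      = pvV board i (N - 1 - i))]

-- the scatter pass, characterized
lemma pv_scatter_spec (board : List (List Int)) (N : Nat) :
    (pvScatter board N).length = 2 * N + 2 ∧
    ∀ m, (pvScatter board N).getD m 0
      = ((List.range N).map (fun i => ((List.range N).map (fun j => pvCell board N i j m)).sum)).sum := by
  obtain ⟨h1, h2⟩ := pv_fold_getD
    (fun (acc : List Int) (i : Nat) => (List.range N).foldl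
      (fun (acc : List Int) (j : Nat) => pvBodyJ board (N : Int) acc (i : Int) (j : Int)) acc)
    (fun (i m : Nat) => ((List.range N).map (fun j => pvCell board N i j m)).sum)
    (2 * N + 2)
    (List.range N)
    (by
      intro acc i hi hacc
      rw [List.mem_range] at hi
      exact pv_fold_getD
        (fun (acc : List Int) (j : Nat) => pvBodyJ board (N : Int) acc (i : Int) (j : Int))
        (fun (j m : Nat) => pvCell board N i j m)
        (2 * N + 2) (List.range N)
        (fun acc2 j hj hacc2 =>
          pv_cell_step board N i j hi (List.mem_range.mp hj) acc2 hacc2)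
        acc hacc)
    (List.replicate (2 * N + 2) 0)
    (by simp)
  refine ⟨h1, ?_⟩
  intro m
  rw [show (pvScatter board N) = (List.range N).foldl
    (fun (acc : List Int) (i : Nat) => (List.range N).foldl
      (fun (acc : List Int) (j : Nat) => pvBodyJ board (N : Int) acc (i : Int) (j : Int)) acc)
    (List.replicate (2 * N + 2) 0) from rfl, h2 m, pv_repl_getD, zero_add]

-- max of B's accumulator table equals the max of the four groups
lemma pv_scatter_max (board : List (List Int)) (N : Nat) (hN : 0 < N) :
    (pvScatter board N).foldl max 0 =
      max (((List.range N).map (fun i => pvV board i i)).sum)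
        (max (((List.range N).map (fun i => pvV board i (N - 1 - i))).sum)
          (max (((List.range N).map (fun i => ((List.range N).map (fun j => pvV board i j)).sum)).foldl max 0)
               (((List.range N).map (fun k => ((List.range N).map (fun i => pvV board i k)).sum)).foldl max 0))) := by
  obtain ⟨hlen, hgd⟩ := pv_scatter_spec board N
  have hself : (List.range (2 * N + 2)).map (fun m => (pvScatter board N).getD m 0)
      = pvScatter board N := by
    rw [pv_map_getD_range _ _ (le_of_eq hlen.symm), ← hlen, List.take_length]
  rw [← hself, List.map_congr_left (fun m _ => hgd m)]
  rw [show 2 * N + 2 = N + N + 2 from by ring]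
  rw [show N + N + 2 = (N + N) + 2 from rfl, List.range_add (n := N + N) (m := 2),
      List.range_add (n := N) (m := N)]
  rw [show List.range 2 = [0, 1] from rfl]
  simp only [List.map_append, List.map_map, List.map_cons, List.map_nil, List.foldl_append]
  rw [List.map_congr_left (fun m hm => pv_S_row board N m hN (List.mem_range.mp hm))]
  rw [List.map_congr_left (fun k hk => by
        rw [List.mem_range] at hk
        show ((List.range N).map (fun i => ((List.range N).map (fun j => pvCell board N i j (N + k))).sum)).sum
          = ((List.range N).map (fun i => pvV board i k)).sum
        exact pv_S_col board N k hN hk :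
      ∀ k ∈ List.range N,
        ((fun m => ((List.range N).map (fun i => ((List.range N).map (fun j => pvCell board N i j m)).sum)).sum) ∘
          fun x => N + x) k
          = ((List.range N).map (fun i => pvV board i k)).sum)]
  rw [show N + N + 0 = 2 * N from by ring, show N + N + 1 = 2 * N + 1 from by ring]
  rw [pv_S_diag board N hN, pv_S_anti board N hN]
  generalize (List.map (fun i => pvV board i i) (List.range N)).sum = d
  generalize (List.map (fun i => pvV board i (N - 1 - i)) (List.range N)).sum = a
  generalize hrl : List.map (fun i => (List.map (fun j => pvV board i j) (List.range N)).sum) (List.range N) = rl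
  generalize hcl : List.map (fun k => (List.map (fun i => pvV board i k) (List.range N)).sum) (List.range N) = cl
  have hR0 : (0 : Int) ≤ rl.foldl max 0 := (PySem.List.le_foldl_max rl 0).1
  have h1 := pv_foldl_max_max cl (rl.foldl max 0) 0
  rw [max_eq_left hR0] at h1
  rw [h1]
  simp only [List.foldl_cons, List.foldl_nil]
  generalize rl.foldl max 0 = R
  generalize cl.foldl max 0 = C
  omega

-- B's value as the max over the four groups (Nat level lifted back to the Int-level statement)
lemma pvB_eq (n : Int) (board : List (List Int)) (hn : 0 < n) :
    solution_alt n board =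
      max (((PySem.List.pyRange 0 n 1).map (fun i => pvGet2 board i i)).sum)
        (max (((PySem.List.pyRange 0 n 1).map (fun i => pvGet2 board i (n - i - 1))).sum)
          (max (((PySem.List.pyRange 0 n 1).map (pvR board n)).foldl max 0)
               (((PySem.List.pyRange 0 n 1).map (pvC board n)).foldl max 0))) := by
  obtain ⟨N, rfl⟩ : ∃ N : Nat, n = (N : Int) := ⟨n.toNat, by omega⟩
  have hN : 0 < N := by exact_mod_cast hn
  have hrange0 : PySem.List.pyRange 0 (N : Int) 1 = (List.range N).map (fun k : Nat => (k : Int)) := by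
    rw [PySem.List.pyRange_one]
    simp
  have hport : solution_alt (N : Int) board = (pvScatter board N).foldl max 0 := by
    unfold solution_alt
    rw [hrange0]
    simp only [List.foldl_map]
    rw [PySem.List.max?_id_cons, Option.getD_some]
    rw [show (2 * (N : Int) + 2).toNat = 2 * N + 2 from by omega]
    rfl
  rw [hport, pv_scatter_max board N hN]
  -- translate each of the four A-side groups to the Nat level
  have hdiag : ((PySem.List.pyRange 0 (N : Int) 1).map (fun i => pvGet2 board i i)).sum
      = ((List.range N).map (fun i => pvV board i i)).sum := by
    rw [hrange0, List.map_map]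
    rfl
  have hanti : ((PySem.List.pyRange 0 (N : Int) 1).map (fun i => pvGet2 board i ((N : Int) - i - 1))).sum
      = ((List.range N).map (fun i => pvV board i (N - 1 - i))).sum := by
    rw [hrange0, List.map_map]
    apply congrArg List.sum
    apply List.map_congr_left
    intro k hk
    rw [List.mem_range] at hk
    show pvGet2 board (k : Int) ((N : Int) - (k : Int) - 1) = pvV board k (N - 1 - k)
    unfold pvV
    rw [show ((N : Int) - (k : Int) - 1) = ((N - 1 - k : Nat) : Int) from by omega]
  have hrow : ((PySem.List.pyRange 0 (N : Int) 1).map (pvR board (N : Int))).foldl max 0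
      = ((List.range N).map (fun i => ((List.range N).map (fun j => pvV board i j)).sum)).foldl max 0 := by
    rw [hrange0, List.map_map]
    apply congrArg (fun l => List.foldl max 0 l)
    apply List.map_congr_left
    intro k hk
    show pvR board (N : Int) (k : Int) = ((List.range N).map (fun j => pvV board k j)).sum
    unfold pvR
    rw [hrange0, List.map_map]
    rfl
  have hcol : ((PySem.List.pyRange 0 (N : Int) 1).map (pvC board (N : Int))).foldl max 0
      = ((List.range N).map (fun k => ((List.range N).map (fun i => pvV board i k)).sum)).foldl max 0 := by
    rw [hrange0, List.map_map]
    apply congrArg (fun l => List.foldl max 0 l)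
    apply List.map_congr_left
    intro k hk
    show pvC board (N : Int) (k : Int) = ((List.range N).map (fun i => pvV board i k)).sum
    unfold pvC
    rw [hrange0, List.map_map]
    rfl
  rw [hdiag, hanti, hrow, hcol]

-- ===== VERDICT (by name: the statement is the Claim_ definition above) =====
theorem solution_spec : Claim_equal_solution := by
  intro n board _ hpre
  unfold Spec_solution
  by_cases hn : n ≤ 0
  · simp only [solution, solution_alt, PySem.List.pyRange_one_eq_nil hn, List.foldl_nil]
    rw [PySem.List.max?_id_cons, Option.getD_some, pv_foldl_max_replicate]
    simp
  · rw [pvA_eq, pvB_eq n board (by omega)]
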